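-- pv_equiv track=rewrite | github.com/AIk1r/Codewars-Python | 6-kyu/Perfect Square.py | perfect_square
-- ===== SOURCE A (Python) =====
-- def perfect_square(square):
--     arr = square.split('\n')
--     l = len(arr[0])
--     if len(arr) != l:
--         return False
--     for i in range(len(arr)):
--         if len(arr[i]) != l:
--             return False
--         for j in arr[i]:
--             if j != '.':
--                 return False
--     return True
-- ===== SOURCE B (Python) =====
-- def perfect_square(square):
--     n = len(square.split('\n'))
--     return square == '\n'.join(['.' * n] * n)
-- ===== Notes on version B (the rewrite author's own statement) =====
-- stated objective: simpler
-- what changed: Instead of scanning rows and characters with nested loops, B builds the unique acceptable string (n lines of n dots, n = number of lines) and returns one equality comparison against it.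
import Mathlib
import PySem

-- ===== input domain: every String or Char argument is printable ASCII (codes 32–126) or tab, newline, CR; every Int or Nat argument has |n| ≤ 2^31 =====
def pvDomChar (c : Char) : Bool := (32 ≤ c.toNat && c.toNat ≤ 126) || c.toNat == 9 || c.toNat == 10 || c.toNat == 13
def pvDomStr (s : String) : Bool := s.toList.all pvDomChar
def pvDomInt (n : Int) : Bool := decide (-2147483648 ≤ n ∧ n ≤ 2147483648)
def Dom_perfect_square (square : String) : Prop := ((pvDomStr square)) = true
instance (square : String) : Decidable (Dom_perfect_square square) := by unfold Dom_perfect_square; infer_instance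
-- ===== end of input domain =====

-- B replaces A's nested row/character scan by constructing the unique acceptable n×n dot grid and one equality test (objective: simpler).


-- ===== PORT A =====
-- helper: the two nested 'for' loops of A (row length check, then per-character dot check)
def pvRowsA (l : Nat) : List (List Char) → Bool
  | [] => true
  | r :: rs =>
    if r.length ≠ l then false
    else if r.any (fun j => j ≠ '.') then false
    else pvRowsA l rs

def perfect_square (square : String) : Bool :=
  let arr := PySem.Chars.splitOn square.toList ['\n']
  let l := (PySem.List.pyGetD arr 0 []).length
  if arr.length ≠ l then false
  else pvRowsA l arr

-- ===== PORT B =====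
def perfect_square_alt (square : String) : Bool :=
  let n := (PySem.Chars.splitOn square.toList ['\n']).length
  square.toList == PySem.Chars.join ['\n'] (List.replicate n (List.replicate n '.'))

-- ===== PRECONDITION & SPEC =====
def Spec_perfect_square (square : String) (out : Bool) : Prop := out = perfect_square_alt square
instance (square : String) (out : Bool) : Decidable (Spec_perfect_square square out) := by unfold Spec_perfect_square; infer_instance

-- ===== CLAIM (what is proved, stated in full; the proofs are below) =====
def Claim_equal_perfect_square : Prop := ∀ (square : String), Dom_perfect_square square → Spec_perfect_square square (perfect_square square)

-- ===== LEMMAS AND PROOFS =====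

-- reference splitter: s.split('\n') as a plain structural recursion
def pvSp : List Char → List (List Char)
  | [] => [[]]
  | c :: rest => if c = '\n' then [] :: pvSp rest else (pvSp rest).modifyHead (c :: ·)

theorem pvSp_ne_nil (s : List Char) : pvSp s ≠ [] := by
  cases s with
  | nil => simp [pvSp]
  | cons c rest =>
    simp only [pvSp]
    split
    · simp
    · cases h : pvSp rest with
      | nil => exact absurd h (pvSp_ne_nil rest)
      | cons a as => simp [List.modifyHead]

theorem pvSp_cons (s : List Char) : ∃ a as, pvSp s = a :: as := by
  cases h : pvSp s with
  | nil => exact absurd h (pvSp_ne_nil s)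
  | cons a as => exact ⟨a, as, rfl⟩

theorem pv_go_eq (l : List Char) : ∀ (fuel : Nat) (cur : List Char) (acc : List (List Char)),
    l.length < fuel →
    PySem.Chars.splitOn.go ['\n'] fuel l cur acc = acc.reverse ++ (pvSp l).modifyHead (cur.reverse ++ ·) := by
  induction l with
  | nil =>
    intro fuel cur acc h
    cases fuel with
    | zero => omega
    | succ f => simp [PySem.Chars.splitOn.go, pvSp]
  | cons c rest ih =>
    intro fuel cur acc h
    cases fuel with
    | zero => simp at h
    | succ f =>
      have hlt : rest.length < f := by simpa using h
      obtain ⟨a, as, hsp⟩ := pvSp_cons rest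
      by_cases hc : c = '\n'
      · subst hc
        simp [PySem.Chars.splitOn.go, List.isPrefixOf, ih f [] (cur.reverse :: acc) hlt,
              pvSp, hsp, List.modifyHead]
      · have hc2 : ¬('\n' = c) := fun h => hc h.symm
        simp [PySem.Chars.splitOn.go, List.isPrefixOf, hc, hc2, ih f (c :: cur) acc hlt,
              pvSp, hsp, List.modifyHead]

theorem pv_splitOn_eq (s : List Char) : PySem.Chars.splitOn s ['\n'] = pvSp s := by
  rw [PySem.Chars.splitOn, pv_go_eq s (s.length + 1) [] [] (by omega)]
  obtain ⟨a, as, hsp⟩ := pvSp_cons s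
  simp [hsp, List.modifyHead]

-- join '\n' undoes pvSp
theorem pv_join_pvSp (s : List Char) : PySem.Chars.join ['\n'] (pvSp s) = s := by
  induction s with
  | nil => simp [pvSp, PySem.Chars.join_singleton]
  | cons c rest ih =>
    obtain ⟨a, as, hsp⟩ := pvSp_cons rest
    by_cases hc : c = '\n'
    · subst hc
      rw [pvSp, if_pos rfl, hsp, PySem.Chars.join_cons_cons, ← hsp, ih]
      simp
    · rw [pvSp, if_neg hc, hsp, List.modifyHead]
      cases as with
      | nil =>
        rw [PySem.Chars.join_singleton]
        rw [hsp, PySem.Chars.join_singleton] at ih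
        simp [ih]
      | cons b bs =>
        rw [PySem.Chars.join_cons_cons]
        rw [hsp, PySem.Chars.join_cons_cons] at ih
        simp [← ih]

-- pvSp on a newline-free list is the singleton
theorem pvSp_free (x : List Char) (hx : '\n' ∉ x) : pvSp x = [x] := by
  induction x with
  | nil => simp [pvSp]
  | cons c r ih =>
    have hc : c ≠ '\n' := by intro h; exact hx (h ▸ List.mem_cons_self)
    have hr : '\n' ∉ r := fun h => hx (List.mem_cons_of_mem _ h)
    simp [pvSp, hc, ih hr, List.modifyHead]

theorem pvSp_append (x t : List Char) (hx : '\n' ∉ x) :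
    pvSp (x ++ '\n' :: t) = x :: pvSp t := by
  induction x with
  | nil => simp [pvSp]
  | cons c r ih =>
    have hc : c ≠ '\n' := by intro h; exact hx (h ▸ List.mem_cons_self)
    have hr : '\n' ∉ r := fun h => hx (List.mem_cons_of_mem _ h)
    simp [pvSp, hc, ih hr, List.modifyHead]

-- pvSp undoes join '\n' on newline-free pieces
theorem pv_pvSp_join (L : List (List Char)) (hne : L ≠ []) (hfree : ∀ r ∈ L, '\n' ∉ r) :
    pvSp (PySem.Chars.join ['\n'] L) = L := by
  induction L with
  | nil => exact absurd rfl hne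
  | cons x ys ih =>
    cases ys with
    | nil =>
      rw [PySem.Chars.join_singleton]
      exact pvSp_free x (hfree x List.mem_cons_self)
    | cons y zs =>
      rw [PySem.Chars.join_cons_cons]
      have h1 := pvSp_append x (PySem.Chars.join ['\n'] (y :: zs)) (hfree x List.mem_cons_self)
      have h2 := ih (by simp) (fun r hr => hfree r (List.mem_cons_of_mem _ hr))
      rw [List.append_assoc, List.singleton_append, h1, h2]

theorem pvRowsA_iff (l : Nat) (arr : List (List Char)) :
    pvRowsA l arr = true ↔ ∀ r ∈ arr, r = List.replicate l '.' := by
  induction arr with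
  | nil => simp [pvRowsA]
  | cons r rs ih =>
    simp only [pvRowsA]
    by_cases hl : r.length = l
    · by_cases hd : ∃ j ∈ r, j ≠ '.'
      · have hne : r ≠ List.replicate l '.' := by
          intro h
          obtain ⟨j, hj, hj'⟩ := hd
          exact hj' (List.eq_of_mem_replicate (h ▸ hj))
        simp [hd, hne]
      · have hr : r = List.replicate l '.' := by
          rw [List.eq_replicate_iff]
          refine ⟨hl, fun b hb => ?_⟩
          by_contra hb'
          exact hd ⟨b, hb, hb'⟩
        simp [ih, hr]
    · have hne : r ≠ List.replicate l '.' := by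
        intro h; exact hl (by simp [h])
      simp [hl, hne]

theorem pv_main (s : List Char) :
    (if (pvSp s).length ≠ ((pvSp s).headD []).length then false
     else pvRowsA ((pvSp s).headD []).length (pvSp s))
    = (s == PySem.Chars.join ['\n']
          (List.replicate (pvSp s).length (List.replicate (pvSp s).length '.'))) := by
  obtain ⟨a, as, hsp⟩ := pvSp_cons s
  rw [Bool.eq_iff_iff]
  constructor
  · intro h
    rw [beq_iff_eq]
    by_cases hlen : (pvSp s).length = ((pvSp s).headD []).length
    · rw [if_neg (by omega)] at h
      rw [pvRowsA_iff] at h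
      have harr : pvSp s = List.replicate (pvSp s).length (List.replicate (pvSp s).length '.') := by
        rw [List.eq_replicate_iff]
        refine ⟨rfl, fun r hr => ?_⟩
        rw [h r hr, hlen]
      conv_lhs => rw [← pv_join_pvSp s]
      exact congrArg _ harr
    · rw [if_pos (by omega)] at h
      exact absurd h (by simp)
  · intro h
    rw [beq_iff_eq] at h
    have hn : 0 < (pvSp s).length := by rw [hsp]; simp
    have hfree : ∀ r ∈ List.replicate (pvSp s).length (List.replicate (pvSp s).length '.'), '\n' ∉ r := by
      intro r hr
      rw [List.eq_of_mem_replicate hr]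
      intro hc
      exact absurd (List.eq_of_mem_replicate hc) (by decide)
    have hLne : List.replicate (pvSp s).length (List.replicate (pvSp s).length '.') ≠ [] := by
      intro hc
      rw [List.replicate_eq_nil_iff] at hc
      omega
    have key : pvSp s = List.replicate (pvSp s).length (List.replicate (pvSp s).length '.') := by
      conv_lhs => rw [h]
      exact pv_pvSp_join _ hLne hfree
    have hhead : (pvSp s).headD [] = List.replicate (pvSp s).length '.' := by
      obtain ⟨m, hm⟩ : ∃ m, (pvSp s).length = m + 1 := ⟨(pvSp s).length - 1, by omega⟩
      rw [key, hm, List.replicate_succ]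
      simp
    rw [if_neg (by rw [hhead]; simp)]
    rw [pvRowsA_iff]
    intro r hr
    rw [key] at hr
    rw [List.eq_of_mem_replicate hr, hhead]
    simp

theorem pvGetD_zero (arr : List (List Char)) (a : List Char) (as : List (List Char))
    (h : arr = a :: as) : PySem.List.pyGetD arr (0 : Int) [] = arr.headD [] := by
  subst h
  simp [PySem.List.pyGetD, PySem.List.pyGet?, PySem.List.pyIdx?]

-- ===== VERDICT (by name: the statement is the Claim_ definition above) =====
theorem perfect_square_spec : Claim_equal_perfect_square := by
  intro square _
  unfold Spec_perfect_square perfect_square perfect_square_alt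
  simp only [pv_splitOn_eq]
  obtain ⟨a, as, hsp⟩ := pvSp_cons square.toList
  rw [pvGetD_zero _ a as hsp]
  exact pv_main square.toList
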